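-- pv_equiv track=rewrite | github.com/oigomezz/Retos | Hackerearth/Basic Programming/Implementation/Mathematically-Beautiful-Numbers/solution.py | solve
-- ===== SOURCE A (Python) =====
-- def solve(x, k):
--     while x > 0:
--         ans = x % k
--         if ans > 1:
--             return False
--         else:
--             x //= k
--     return True
-- ===== SOURCE B (Python) =====
-- def solve(x, k):
--     # x is "beautiful" iff it is a sum of *distinct* powers of k (i.e. every
--     # base-k digit is 0 or 1).  Collect all powers of k not exceeding x, then
--     # greedily subtract from the largest down; since each power of k exceeds
--     # the sum of all smaller powers, the greedy residual is 0 exactly when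
--     # such a representation exists.  No division or modulo is used.
--     powers = []
--     p = 1
--     while p <= x:
--         powers.append(p)
--         p *= k
--     for p in reversed(powers):
--         if p <= x:
--             x -= p
--     return x <= 0  # residual never goes negative; x<=0 inputs have no digits
-- ===== Notes on version B (the rewrite author's own statement) =====
-- stated objective: alternative
-- what changed: B replaces A's mod/floordiv digit loop by a different algorithm with no division at all: it builds the list of powers of k up to x by repeated multiplication, then greedily subtracts them from the largest down and tests whether the residual is zero (x is beautiful iff it is a sum of distinct powers of k).
-- outside the precondition, e.g. on solve(5, -2): A returns True, B returns False
import Mathlib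
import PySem

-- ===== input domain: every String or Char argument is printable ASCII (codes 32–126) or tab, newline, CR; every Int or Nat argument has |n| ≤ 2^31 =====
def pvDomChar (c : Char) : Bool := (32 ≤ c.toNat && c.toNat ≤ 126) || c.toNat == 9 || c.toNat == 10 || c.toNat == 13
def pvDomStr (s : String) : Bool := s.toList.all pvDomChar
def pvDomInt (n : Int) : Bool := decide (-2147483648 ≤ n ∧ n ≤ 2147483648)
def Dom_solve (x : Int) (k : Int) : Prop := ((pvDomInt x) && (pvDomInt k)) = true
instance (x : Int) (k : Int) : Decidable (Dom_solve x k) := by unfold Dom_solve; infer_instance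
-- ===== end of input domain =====

-- B re-solves the task with a different algorithm: instead of A's mod/floordiv digit loop,
-- it builds the powers of k up to x by multiplication and greedily subtracts them from the
-- largest down, returning whether the residual is zero (alternative, same asymptotic cost).


-- ===== PORT A =====
-- while x > 0: ans = x % k; if ans > 1: return False; else: x //= k; return True
-- fuel is a totality guard only: under Pre_solve the loop runs at most x.toNat times.
def solveLoopA : Nat → Int → Int → Bool
  | 0, _, _ => true
  | fuel + 1, x, k =>
    if x > 0 then
      let ans := PySem.Int.mod x k
      if ans > 1 then false
      else solveLoopA fuel (PySem.Int.floordiv x k) k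
    else true

def solve (x : Int) (k : Int) : Bool := solveLoopA (x.toNat + 1) x k

-- ===== PORT B =====
-- powers = []; p = 1; while p <= x: powers.append(p); p *= k
-- (fuel is a totality guard; under Pre_solve, p at least doubles each step, so x.toNat+1 suffices)
def powersB : Nat → Int → Int → Int → List Int
  | 0, _, _, _ => []
  | fuel + 1, p, x, k => if p ≤ x then p :: powersB fuel (p * k) x k else []

-- for p in reversed(powers): if p <= x: x -= p
-- return x <= 0
def solve_alt (x : Int) (k : Int) : Bool :=
  decide ((powersB (x.toNat + 1) 1 x k).reverse.foldl
    (fun acc p => if p ≤ acc then acc - p else acc) x ≤ 0)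

-- ===== PRECONDITION & SPEC =====
-- Pre_ restricts to the task's natural domain: for x > 0 it requires a genuine base k ≥ 2,
-- since k = 0 raises ZeroDivisionError, k = 1 loops forever, and a negative base is outside
-- the natural domain (A returns True there only because x % k is never positive).
def Pre_solve (x : Int) (k : Int) : Prop := x ≤ 0 ∨ 2 ≤ k
instance (x : Int) (k : Int) : Decidable (Pre_solve x k) := by unfold Pre_solve; infer_instance
def pvWitness_solve : Int × Int := (5, 2)

def Spec_solve (x : Int) (k : Int) (out : Bool) : Prop := out = solve_alt x k
instance (x : Int) (k : Int) (out : Bool) : Decidable (Spec_solve x k out) := by unfold Spec_solve; infer_instance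

-- ===== CLAIM (what is proved, stated in full; the proofs are below) =====
def Claim_equal_solve : Prop := ∀ (x : Int) (k : Int), Dom_solve x k → Pre_solve x k → Spec_solve x k (solve x k)

-- ===== LEMMAS AND PROOFS =====

-- Reference predicate: every base-k digit of n is at most 1.
def beauN (n k : Nat) : Bool :=
  if h : 2 ≤ k ∧ 0 < n then decide (n % k ≤ 1) && beauN (n / k) k else true
termination_by n
decreasing_by exact Nat.div_lt_self h.2 h.1

-- ----- A-side: the loop computes beauN -----
lemma solveLoopA_eq_beauN (fuel : Nat) (x k : Int) (hk : 2 ≤ k) (hf : x.toNat < fuel) :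
    solveLoopA fuel x k = beauN x.toNat k.toNat := by
  induction fuel generalizing x with
  | zero => omega
  | succ f ih =>
    by_cases hx : x > 0
    · have hn : 0 < x.toNat := by omega
      have hkn : 2 ≤ k.toNat := by omega
      have hxc : ((x.toNat : Int)) = x := by omega
      have hkc : ((k.toNat : Int)) = k := by omega
      have hmod : PySem.Int.mod x k = ((x.toNat % k.toNat : Nat) : Int) := by
        rw [← hxc, ← hkc]; exact PySem.Int.mod_natCast _ _
      have hdiv : PySem.Int.floordiv x k = ((x.toNat / k.toNat : Nat) : Int) := by
        rw [← hxc, ← hkc]; exact PySem.Int.floordiv_natCast _ _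
      rw [solveLoopA, if_pos hx, beauN]
      rw [dif_pos ⟨hkn, hn⟩]
      by_cases hans : PySem.Int.mod x k > 1
      · have : ¬ (x.toNat % k.toNat ≤ 1) := by omega
        simp [hans, this]
      · have h1 : x.toNat % k.toNat ≤ 1 := by omega
        have htn : (PySem.Int.floordiv x k).toNat = x.toNat / k.toNat := by
          rw [hdiv, Int.toNat_natCast]
        have hrec := ih (PySem.Int.floordiv x k)
          (by rw [htn]; exact lt_of_lt_of_le (Nat.div_lt_self hn hkn) (by omega))
        rw [if_neg hans, hrec, htn]
        simp [h1]
    · rw [solveLoopA, if_neg hx, beauN, dif_neg (by omega)]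

-- ----- B-side machinery -----
-- ascending power segment [k^i, k^(i+1), …] of length c
def ascP (k : Int) : Nat → Nat → List Int
  | _, 0 => []
  | i, c + 1 => k ^ i :: ascP k (i + 1) c

-- descending power segment [k^(i+c-1), …, k^i] of length c
def dseg (k : Int) : Nat → Nat → List Int
  | _, 0 => []
  | i, c + 1 => k ^ (i + c) :: dseg k i c

def gstep (acc p : Int) : Int := if p ≤ acc then acc - p else acc

lemma dseg_append (k : Int) (i c : Nat) :
    dseg k (i + 1) c ++ [k ^ i] = dseg k i (c + 1) := by
  induction c with
  | zero => simp [dseg]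
  | succ c ih =>
    show k ^ (i + 1 + c) :: (dseg k (i + 1) c ++ [k ^ i]) = _
    rw [ih]
    show _ = k ^ (i + (c + 1)) :: dseg k i (c + 1)
    congr 1
    ring_nf

lemma ascP_reverse (k : Int) (i c : Nat) :
    (ascP k i c).reverse = dseg k i c := by
  induction c generalizing i with
  | zero => rfl
  | succ c ih =>
    show (k ^ i :: ascP k (i + 1) c).reverse = _
    rw [List.reverse_cons, ih, dseg_append]

-- the port's powers loop builds the ascending segment
lemma powersB_eq_ascP (x k : Int) :
    ∀ (c fuel i : Nat), c ≤ fuel → x < k ^ (i + c) → (∀ j, j < c → k ^ (i + j) ≤ x) →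
      powersB fuel (k ^ i) x k = ascP k i c := by
  intro c
  induction c with
  | zero =>
    intro fuel i _ hlt _
    have hnot : ¬ (k ^ i ≤ x) := by simpa using hlt
    cases fuel with
    | zero => rfl
    | succ f => rw [powersB, if_neg hnot]; rfl
  | succ c ih =>
    intro fuel i hcf hlt hall
    obtain ⟨f, rfl⟩ : ∃ f, fuel = f + 1 := ⟨fuel - 1, by omega⟩
    have hle : k ^ i ≤ x := by simpa using hall 0 (by omega)
    rw [powersB, if_pos hle]
    show _ = k ^ i :: ascP k (i + 1) c
    congr 1
    have hpow : k ^ i * k = k ^ (i + 1) := by ring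
    rw [hpow]
    exact ih f (i + 1) (by omega)
      (by rw [show i + 1 + c = i + (c + 1) by omega]; exact hlt)
      (fun j hj => by rw [show i + 1 + j = i + (j + 1) by omega]; exact hall (j + 1) (by omega))

-- greedy residual stays nonnegative
lemma foldl_gstep_nonneg (L : List Int) : ∀ x : Int, 0 ≤ x → 0 ≤ L.foldl gstep x := by
  induction L with
  | nil => intro x hx; simpa using hx
  | cons p L ih =>
    intro x hx
    rw [List.foldl_cons]
    apply ih
    unfold gstep; split <;> omega

-- greedy residual is at least x minus the sum of the (nonnegative) powers
lemma foldl_gstep_ge (L : List Int) (hL : ∀ p ∈ L, 0 ≤ p) :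
    ∀ x : Int, x - L.sum ≤ L.foldl gstep x := by
  induction L with
  | nil => intro x; simp
  | cons p L ih =>
    intro x
    rw [List.foldl_cons, List.sum_cons]
    have hp : 0 ≤ p := hL p List.mem_cons_self
    have := ih (fun q hq => hL q (List.mem_cons_of_mem _ hq)) (gstep x p)
    have : x - p - L.sum ≤ gstep x p - L.sum := by
      unfold gstep; split <;> omega
    calc x - (p + L.sum) = x - p - L.sum := by ring
      _ ≤ gstep x p - L.sum := this
      _ ≤ List.foldl gstep (gstep x p) L := ih (fun q hq => hL q (List.mem_cons_of_mem _ hq)) _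

lemma dseg_mem_nonneg (k : Int) (hk : 0 ≤ k) (i c : Nat) :
    ∀ p ∈ dseg k i c, 0 ≤ p := by
  induction c with
  | zero => intro p hp; simp [dseg] at hp
  | succ c ih =>
    intro p hp
    rcases List.mem_cons.mp hp with h | h
    · subst h; positivity
    · exact ih p h

lemma dseg_sum_lt (k : Int) (hk : 2 ≤ k) (c : Nat) : (dseg k 0 c).sum < k ^ c := by
  induction c with
  | zero => simp [dseg]
  | succ c ih =>
    rw [dseg, List.sum_cons]
    have h1 : (1 : Int) ≤ k ^ c := one_le_pow₀ (by omega)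
    have h2 : k ^ (c + 1) = k * k ^ c := by ring
    have h3 : 2 * k ^ c ≤ k * k ^ c := by
      apply mul_le_mul_of_nonneg_right (by omega) (by positivity)
    simp only [Nat.zero_add]
    omega

-- beauN of a pure power is true
lemma beauN_pow (k : Nat) (hk : 2 ≤ k) (i : Nat) : beauN (k ^ i) k = true := by
  induction i with
  | zero =>
    rw [pow_zero, beauN, dif_pos ⟨hk, Nat.one_pos⟩]
    have h1 : 1 % k = 1 := Nat.mod_eq_of_lt (by omega)
    have h2 : 1 / k = 0 := Nat.div_eq_of_lt (by omega)
    rw [h1, h2, beauN, dif_neg (by omega)]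
    simp
  | succ i ih =>
    rw [beauN]
    have hpos : 0 < k ^ (i + 1) := Nat.pow_pos (by omega)
    rw [dif_pos ⟨hk, hpos⟩]
    have hmod : k ^ (i + 1) % k = 0 := by
      simp [Nat.pow_succ, Nat.mul_mod_left]
    have hdiv : k ^ (i + 1) / k = k ^ i := by
      rw [Nat.pow_succ, Nat.mul_div_assoc _ (dvd_refl k), Nat.div_self (by omega), Nat.mul_one]
    simp [hmod, hdiv, ih]

-- removing a top power with digit exactly 1 does not change beauty
lemma beauN_sub_pow (k : Nat) (hk : 2 ≤ k) :
    ∀ (c n : Nat), k ^ c ≤ n → n < 2 * k ^ c → beauN n k = beauN (n - k ^ c) k := by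
  intro c
  induction c with
  | zero =>
    intro n h1 h2
    rw [pow_zero] at h1 h2 ⊢
    have hn1 : n = 1 := by omega
    subst hn1
    have hb0 : beauN 0 k = true := by rw [beauN, dif_neg (by omega)]
    have hb1 : beauN 1 k = true := by
      rw [beauN, dif_pos ⟨hk, Nat.one_pos⟩, Nat.mod_eq_of_lt (by omega),
        Nat.div_eq_of_lt (by omega), hb0]
      simp
    rw [hb1, show (1 : Nat) - 1 = 0 from rfl, hb0]
  | succ c ih =>
    intro n h1 h2
    have hkpos : 0 < k := by omega
    have hpow : k ^ (c + 1) = k * k ^ c := by rw [Nat.pow_succ, Nat.mul_comm]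
    by_cases hz : n = k ^ (c + 1)
    · subst hz
      rw [Nat.sub_self, beauN_pow k hk]
      rw [beauN, dif_neg (by omega)]
    · have hpcpos : 0 < k ^ (c + 1) := by positivity
      have hpos : 0 < n := by omega
      have hpos' : 0 < n - k ^ (c + 1) := by omega
      set q := n / k with hqdef
      set r := n % k with hrdef
      have hq : k * q + r = n := Nat.div_add_mod n k
      have hr : r < k := Nat.mod_lt _ hkpos
      have hq1 : k ^ c ≤ q := by
        rw [hqdef, Nat.le_div_iff_mul_le hkpos]
        calc k ^ c * k = k ^ (c + 1) := by rw [Nat.pow_succ]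
          _ ≤ n := h1
      have hq2 : q < 2 * k ^ c := by
        rw [hqdef, Nat.div_lt_iff_lt_mul hkpos]
        calc n < 2 * k ^ (c + 1) := h2
          _ = 2 * k ^ c * k := by rw [Nat.pow_succ]; ring
      have hmulsplit : k * (q - k ^ c) + k * k ^ c = k * q := by
        rw [← Nat.mul_add]
        congr 1
        omega
      have hrepr : n - k ^ (c + 1) = k * (q - k ^ c) + r := by omega
      have hmod : (n - k ^ (c + 1)) % k = r := by
        rw [hrepr, Nat.mul_add_mod_self_left, Nat.mod_eq_of_lt hr]
      have hdiv : (n - k ^ (c + 1)) / k = q - k ^ c := by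
        rw [hrepr, Nat.mul_add_div hkpos, Nat.div_eq_of_lt hr]
        omega
      have hL : beauN n k = (decide (n % k ≤ 1) && beauN (n / k) k) := by
        rw [beauN, dif_pos ⟨hk, hpos⟩]
      have hR : beauN (n - k ^ (c + 1)) k
          = (decide ((n - k ^ (c + 1)) % k ≤ 1) && beauN ((n - k ^ (c + 1)) / k) k) := by
        rw [beauN, dif_pos ⟨hk, hpos'⟩]
      rw [hL, hR, hmod, hdiv, ← hrdef, ← hqdef]
      congr 1
      exact ih q hq1 hq2

-- a digit ≥ 2 at position c makes beauN false
lemma beauN_false_of_big (k : Nat) (hk : 2 ≤ k) :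
    ∀ (c n : Nat), 2 * k ^ c ≤ n → n < k ^ (c + 1) → beauN n k = false := by
  intro c
  induction c with
  | zero =>
    intro n h1 h2
    simp at h1
    rw [beauN, dif_pos ⟨hk, by omega⟩]
    have : n % k = n := Nat.mod_eq_of_lt (by simpa using h2)
    simp [this]; omega
  | succ c ih =>
    intro n h1 h2
    have hpos : 0 < n := by
      have : 0 < k ^ (c + 1) := Nat.pow_pos (by omega); omega
    rw [beauN, dif_pos ⟨hk, hpos⟩]
    have hd1 : 2 * k ^ c ≤ n / k := by
      rw [Nat.le_div_iff_mul_le (by omega : 0 < k)]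
      calc 2 * k ^ c * k = 2 * k ^ (c + 1) := by ring
        _ ≤ n := h1
    have hd2 : n / k < k ^ (c + 1) := by
      rw [Nat.div_lt_iff_lt_mul (by omega : 0 < k)]
      calc n < k ^ (c + 2) := h2
        _ = k ^ (c + 1) * k := by ring
    rw [ih (n / k) hd1 hd2]
    simp

-- main greedy lemma: residual over the descending powers is 0 iff all digits ≤ 1
lemma greedy_main (k : Int) (hk : 2 ≤ k) :
    ∀ (c : Nat) (x : Int), 0 ≤ x → x < k ^ c →
      ((dseg k 0 c).foldl gstep x = 0 ↔ beauN x.toNat k.toNat = true) := by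
  intro c
  induction c with
  | zero =>
    intro x hx hlt
    simp at hlt
    have : x = 0 := by omega
    subst this
    simp [dseg, beauN]
  | succ c ih =>
    intro x hx hlt
    rw [dseg, List.foldl_cons]
    simp only [Nat.zero_add]
    by_cases hle : k ^ c ≤ x
    · rw [show gstep x (k ^ c) = x - k ^ c from if_pos hle]
      by_cases hsmall : x - k ^ c < k ^ c
      · rw [ih (x - k ^ c) (by omega) hsmall]
        -- beauN x.toNat = beauN (x - k^c).toNat by the shift lemma
        have hcast : (k ^ c : Int) = ((k.toNat ^ c : Nat) : Int) := by
          push_cast; congr 1; omega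
        have hb := beauN_sub_pow k.toNat (by omega) c x.toNat
          (by omega) (by omega)
        have harg : (x - k ^ c).toNat = x.toNat - k.toNat ^ c := by omega
        rw [harg, ← hb]
      · -- digit ≥ 2: both sides false
        constructor
        · intro h0
          exfalso
          have hge := foldl_gstep_ge (dseg k 0 c) (dseg_mem_nonneg k (by omega) 0 c) (x - k ^ c)
          have hsum := dseg_sum_lt k hk c
          omega
        · intro hb
          exfalso
          have hcast : (k ^ c : Int) = ((k.toNat ^ c : Nat) : Int) := by
            push_cast; congr 1; omega
          have hcast' : (k ^ (c+1) : Int) = ((k.toNat ^ (c+1) : Nat) : Int) := by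
            push_cast; congr 1; omega
          have := beauN_false_of_big k.toNat (by omega) c x.toNat (by omega) (by omega)
          rw [this] at hb
          exact Bool.false_ne_true hb
    · rw [show gstep x (k ^ c) = x from if_neg hle]
      exact ih x hx (by omega)

-- existence of the top exponent
lemma exists_top_exp (k : Int) (hk : 2 ≤ k) (x : Int) (hx : 1 ≤ x) :
    ∃ m : Nat, m ≤ x.toNat ∧ k ^ m ≤ x ∧ x < k ^ (m + 1) := by
  set n := x.toNat with hn
  set kn := k.toNat with hkn
  have hn1 : 1 ≤ n := by omega
  have hkn2 : 2 ≤ kn := by omega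
  refine ⟨Nat.log kn n, ?_, ?_, ?_⟩
  · have h1 := Nat.pow_log_le_self kn (show n ≠ 0 by omega)
    have h2 : Nat.log kn n < 2 ^ Nat.log kn n := Nat.lt_two_pow_self
    have h3 : 2 ^ Nat.log kn n ≤ kn ^ Nat.log kn n := Nat.pow_le_pow_left hkn2 _
    omega
  · have h1 := Nat.pow_log_le_self kn (show n ≠ 0 by omega)
    have : ((kn ^ Nat.log kn n : Nat) : Int) ≤ (n : Int) := by exact_mod_cast h1
    calc k ^ Nat.log kn n = ((kn : Int)) ^ Nat.log kn n := by congr 1; omega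
      _ = ((kn ^ Nat.log kn n : Nat) : Int) := by push_cast; rfl
      _ ≤ (n : Int) := this
      _ = x := by omega
  · have h1 := Nat.lt_pow_succ_log_self (show 1 < kn by omega) n
    have : (n : Int) < ((kn ^ (Nat.log kn n + 1) : Nat) : Int) := by exact_mod_cast h1
    calc x = (n : Int) := by omega
      _ < ((kn ^ (Nat.log kn n + 1) : Nat) : Int) := this
      _ = ((kn : Int)) ^ (Nat.log kn n + 1) := by push_cast; rfl
      _ = k ^ (Nat.log kn n + 1) := by congr 1; omega

-- ===== VERDICT (by name: the statement is the Claim_ definition above) =====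
theorem solve_spec : Claim_equal_solve := by
  intro x k _ hpre
  unfold Spec_solve
  by_cases hx : x ≤ 0
  · -- A: loop body never runs; B: powers list empty, residual = x ≤ 0
    have hA : solve x k = true := by
      unfold solve
      have : x.toNat = 0 := by omega
      rw [this]
      rw [solveLoopA, if_neg (by omega)]
    have hB : solve_alt x k = true := by
      unfold solve_alt
      have h0 : x.toNat = 0 := by omega
      rw [h0]
      rw [powersB, if_neg (by omega)]
      simpa using hx
    rw [hA, hB]
  · have hx1 : 1 ≤ x := by omega
    have hk : 2 ≤ k := hpre.resolve_left hx
    obtain ⟨m, hmx, hml, hmu⟩ := exists_top_exp k hk x hx1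
    -- A side
    have hA : solve x k = beauN x.toNat k.toNat :=
      solveLoopA_eq_beauN _ x k hk (by omega)
    -- B side: powers list is the ascending segment of length m+1
    have hall : ∀ j, j < m + 1 → k ^ (0 + j) ≤ x := by
      intro j hj
      calc k ^ (0 + j) = k ^ j := by rw [Nat.zero_add]
        _ ≤ k ^ m := pow_le_pow_right₀ (by omega) (by omega)
        _ ≤ x := hml
    have hpows : powersB (x.toNat + 1) 1 x k = ascP k 0 (m + 1) := by
      have h1 : (1 : Int) = k ^ 0 := by rw [pow_zero]
      rw [h1]
      exact powersB_eq_ascP x k (m + 1) (x.toNat + 1) 0 (by omega)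
        (by rw [Nat.zero_add]; exact hmu) hall
    unfold solve_alt
    rw [hpows, ascP_reverse]
    have hmain := greedy_main k hk (m + 1) x (by omega) hmu
    have hnn := foldl_gstep_nonneg (dseg k 0 (m + 1)) x (by omega)
    rw [hA]
    have hfold : (dseg k 0 (m + 1)).foldl (fun acc p => if p ≤ acc then acc - p else acc) x
        = (dseg k 0 (m + 1)).foldl gstep x := by rfl
    rw [hfold]
    by_cases hz : (dseg k 0 (m + 1)).foldl gstep x = 0
    · rw [(hmain.mp hz)]
      simp [hz]
    · have : beauN x.toNat k.toNat = false := by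
        cases hb : beauN x.toNat k.toNat
        · rfl
        · exact absurd (hmain.mpr hb) hz
      rw [this]
      simp; omega
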